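-- pv_equiv track=rewrite | github.com/myoshi2891/Algorithm-DataStructures-Math-SQL | Algorithm/Binary Lifting/atcoder/B57/GPT/B57.py | solve
-- ===== SOURCE A (Python) =====
-- from typing import List
--
-- def sum_digits(x: int) -> int:
--     """桁和を計算する関数"""
--     s: int = 0
--     while x > 0:
--         s += x % 10
--         x //= 10
--     return s
--
-- def solve(N: int, K: int) -> List[int]:
--     """
--     各 i (1 <= i <= N) について、K 回操作後の値を求める
--     Parameters:
--         N (int): 最大の整数
--         K (int): 操作回数 (1 <= K <= 10^9)
--     Returns:
--         List[int]: 各 i の最終値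
--     """
--     # 1ステップ先の値
--     next_arr: List[int] = [0] * (N + 1)
--     for i in range(1, N + 1):
--         next_arr[i] = i - sum_digits(i)
--
--     # ダブリングテーブル構築
--     LOG: int = 32  # K <= 1e9 なので 2^30 程度で十分、余裕を持たせて32
--     jump: List[List[int]] = [[0] * (N + 1) for _ in range(LOG)]
--     jump[0] = next_arr[:]
--     for p in range(1, LOG):
--         prev = jump[p - 1]
--         cur = jump[p]
--         for i in range(1, N + 1):
--             cur[i] = prev[prev[i]]
--
--     # 各 i について K ステップ先を計算
--     res: List[int] = [0] * N
--     for i in range(1, N + 1):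
--         cur = i
--         steps = K
--         bit = 0
--         while steps > 0:
--             if steps & 1:
--                 cur = jump[bit][cur]
--             steps >>= 1
--             bit += 1
--         res[i - 1] = cur
--
--     return res
-- ===== SOURCE B (Python) =====
-- from typing import List
--
-- def sum_digits(x: int) -> int:
--     s = 0
--     while x > 0:
--         s += x % 10
--         x //= 10
--     return s
--
-- def solve(N: int, K: int) -> List[int]:
--     # Repeated squaring of the successor map i -> i - sum_digits(i), applied to
--     # the whole array: O(log K) adaptive passes, no precomputed 32-level table.
--     res = list(range(N + 1))
--     base = [i - sum_digits(i) for i in range(N + 1)]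
--     k = K
--     while k > 0:
--         if k & 1:
--             res = [base[r] for r in res]
--         base = [base[b] for b in base]
--         k >>= 1
--     return res[1:]
-- ===== Notes on version B (the rewrite author's own statement) =====
-- stated objective: faster
-- what changed: Replaced the fixed 32-level binary-lifting table plus a per-element 32-step bit-decomposition query loop by exponentiation-by-squaring of the whole successor array: O(bitlen K) adaptive full-array composition passes, no precomputed table and no per-element query loop.
import Mathlib
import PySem

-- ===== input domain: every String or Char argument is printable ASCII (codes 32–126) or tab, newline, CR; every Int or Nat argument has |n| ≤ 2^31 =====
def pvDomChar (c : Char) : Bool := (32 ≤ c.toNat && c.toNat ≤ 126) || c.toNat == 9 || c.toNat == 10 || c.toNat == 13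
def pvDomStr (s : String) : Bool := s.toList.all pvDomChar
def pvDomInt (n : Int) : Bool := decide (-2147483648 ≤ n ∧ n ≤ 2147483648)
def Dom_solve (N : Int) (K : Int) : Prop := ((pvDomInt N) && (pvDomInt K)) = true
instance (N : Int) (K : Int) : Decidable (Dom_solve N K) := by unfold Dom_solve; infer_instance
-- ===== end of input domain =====

-- B replaces A's fixed 32-level binary-lifting table and per-element bit-query loop by
-- exponentiation-by-squaring of the whole successor array (objective: faster, constant factor).

-- ===== PORT A =====
-- sum_digits: s = 0; while x > 0: s += x % 10; x //= 10
def sumDigitsAux (s x : Int) : Int :=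
  if _h : 0 < x then sumDigitsAux (s + PySem.Int.mod x 10) (PySem.Int.floordiv x 10) else s
termination_by x.toNat
decreasing_by
  rw [PySem.Int.floordiv_eq_ediv_of_pos (by omega : (0:Int) < 10)]
  omega

def sum_digits (x : Int) : Int := sumDigitsAux 0 x

-- next_arr = [0]*(N+1); for i in range(1, N+1): next_arr[i] = i - sum_digits(i)
-- (indices written in these loops are provably nonnegative and in range, so pySetD/pyGetD are exact)
def nextArr (N : Int) : List Int :=
  (PySem.List.pyRange 1 (N + 1) 1).foldl
    (fun arr i => PySem.List.pySetD arr i (i - sum_digits i))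
    (List.replicate (N + 1).toNat 0)

-- jump = [[0]*(N+1) for _ in range(32)]; jump[0] = next_arr[:];
-- for p in range(1, 32): for i in range(1, N+1): jump[p][i] = jump[p-1][jump[p-1][i]]
def jumpTable (N : Int) : List (List Int) :=
  (PySem.List.pyRange 1 32 1).foldl
    (fun jump p =>
      let prev := PySem.List.pyGetD jump (p - 1) []
      let cur := (PySem.List.pyRange 1 (N + 1) 1).foldl
        (fun cur i =>
          PySem.List.pySetD cur i
            (PySem.List.pyGetD prev (PySem.List.pyGetD prev i 0) 0))
        (PySem.List.pyGetD jump p [])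
      PySem.List.pySetD jump p cur)
    (PySem.List.pySetD (List.replicate 32 (List.replicate (N + 1).toNat (0 : Int))) 0 (nextArr N))

-- while steps > 0: if steps & 1: cur = jump[bit][cur]; steps >>= 1; bit += 1
def queryLoop (jump : List (List Int)) (cur steps bit : Int) : Int :=
  if h : 0 < steps then
    queryLoop jump
      (if PySem.Int.band steps 1 ≠ 0 then
         PySem.List.pyGetD (PySem.List.pyGetD jump bit []) cur 0
       else cur)
      (steps >>> (1 : Nat)) (bit + 1)
  else cur
termination_by steps.toNat
decreasing_by
  have hs : steps >>> (1 : Nat) = steps / 2 := by simp [Int.shiftRight_eq_div_pow]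
  rw [hs]; omega

-- res = [0]*N; for i in range(1, N+1): ... res[i-1] = cur
def solve (N : Int) (K : Int) : List Int :=
  let jump := jumpTable N
  (PySem.List.pyRange 1 (N + 1) 1).foldl
    (fun res i => PySem.List.pySetD res (i - 1) (queryLoop jump i K 0))
    (List.replicate N.toNat 0)

-- ===== PORT B =====
-- while k > 0: if k & 1: res = [base[r] for r in res]; base = [base[b] for b in base]; k >>= 1
def sqLoop (res base : List Int) (k : Int) : List Int :=
  if _h : 0 < k then
    sqLoop
      (if PySem.Int.band k 1 ≠ 0 then res.map (fun r => PySem.List.pyGetD base r 0) else res)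
      (base.map (fun b => PySem.List.pyGetD base b 0))
      (k >>> (1 : Nat))
  else res
termination_by k.toNat
decreasing_by
  have hs : k >>> (1 : Nat) = k / 2 := by simp [Int.shiftRight_eq_div_pow]
  rw [hs]; omega

-- res = list(range(N+1)); base = [i - sum_digits(i) for i in range(N+1)]; ...; return res[1:]
def solve_alt (N : Int) (K : Int) : List Int :=
  PySem.List.slice
    (sqLoop (PySem.List.pyRange 0 (N + 1) 1)
      ((PySem.List.pyRange 0 (N + 1) 1).map (fun i => i - sum_digits i)) K)
    (some 1) none

-- ===== PRECONDITION & SPEC =====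
def Spec_solve (N : Int) (K : Int) (out : List Int) : Prop := out = solve_alt N K
instance (N : Int) (K : Int) (out : List Int) : Decidable (Spec_solve N K out) := by
  unfold Spec_solve; infer_instance

-- ===== CLAIM (what is proved, stated in full; the proofs are below) =====
def Claim_equal_solve : Prop := ∀ (N : Int) (K : Int), Dom_solve N K → Spec_solve N K (solve N K)

-- ===== LEMMAS AND PROOFS =====

-- one application of the step i ↦ i - sum_digits(i), and its n-fold iterate
def pf (x : Int) : Int := x - sum_digits x

def iterF : Nat → Int → Int
  | 0, x => x
  | n + 1, x => iterF n (pf x)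

theorem sumDigitsAux_bounds :
    ∀ (n : Nat) (x s : Int), x.toNat ≤ n → 0 ≤ x →
      s ≤ sumDigitsAux s x ∧ sumDigitsAux s x ≤ s + x ∧ (0 < x → s + 1 ≤ sumDigitsAux s x) := by
  intro n
  induction n with
  | zero =>
    intro x s hx h0
    have hx0 : x = 0 := by omega
    subst hx0
    rw [sumDigitsAux]
    simp
  | succ n ih =>
    intro x s hx h0
    rw [sumDigitsAux]
    by_cases hp : 0 < x
    · rw [dif_pos hp]
      rw [PySem.Int.mod_eq_emod_of_pos (by omega : (0:Int) < 10),
          PySem.Int.floordiv_eq_ediv_of_pos (by omega : (0:Int) < 10)]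
      have h := ih (x / 10) (s + x % 10) (by omega) (by omega)
      omega
    · rw [dif_neg hp]
      omega

theorem pf_zero : pf 0 = 0 := by
  show (0:Int) - sumDigitsAux 0 0 = 0
  rw [sumDigitsAux]; norm_num

theorem pf_bounds (x : Int) (hx : 0 ≤ x) : 0 ≤ pf x ∧ pf x ≤ x := by
  rcases lt_or_eq_of_le hx with h | h
  · have := sumDigitsAux_bounds x.toNat x 0 le_rfl (le_of_lt h)
    unfold pf sum_digits
    omega
  · rw [← h]; simp [pf_zero]

theorem iterF_zero_fix (n : Nat) : iterF n 0 = 0 := by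
  induction n with
  | zero => rfl
  | succ n ih => show iterF n (pf 0) = 0; rw [pf_zero]; exact ih

theorem iterF_add (m n : Nat) (x : Int) : iterF (m + n) x = iterF m (iterF n x) := by
  induction n generalizing x with
  | zero => rfl
  | succ n ih =>
    show iterF (m + n) (pf x) = iterF m (iterF n (pf x))
    exact ih (pf x)

theorem iterF_bounds (n : Nat) (x M : Int) (h0 : 0 ≤ x) (hM : x ≤ M) :
    0 ≤ iterF n x ∧ iterF n x ≤ M := by
  induction n generalizing x with
  | zero => exact ⟨h0, hM⟩
  | succ n ih =>
    have hp := pf_bounds x h0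
    exact ih (pf x) hp.1 (le_trans hp.2 hM)

-- B side: repeated squaring keeps both arrays in the shape 'map (iterF e) over range(0, N+1)'
theorem sqLoop_eq (N : Int) : ∀ (n : Nat) (k : Int), k.toNat = n → ∀ (a b : Nat),
    sqLoop ((PySem.List.pyRange 0 (N + 1) 1).map (fun j => iterF a j))
           ((PySem.List.pyRange 0 (N + 1) 1).map (fun j => iterF b j)) k
      = (PySem.List.pyRange 0 (N + 1) 1).map (fun j => iterF (a + k.toNat * b) j) := by
  have hcomp : ∀ (c e : Nat),
      ((PySem.List.pyRange 0 (N + 1) 1).map (fun j => iterF c j)).map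
        (fun r => PySem.List.pyGetD ((PySem.List.pyRange 0 (N + 1) 1).map (fun j => iterF e j)) r 0)
      = (PySem.List.pyRange 0 (N + 1) 1).map (fun j => iterF (e + c) j) := by
    intro c e
    rw [List.map_map]
    apply List.map_congr_left
    intro j hj
    have hjb := (PySem.List.mem_pyRange_one).1 hj
    have hb := iterF_bounds c j N (by omega) (by omega)
    show PySem.List.pyGetD
        ((PySem.List.pyRange 0 (N + 1) 1).map (fun j => iterF e j)) (iterF c j) 0
      = iterF (e + c) j
    rw [PySem.List.pyGetD_map_pyRange_of_nonneg _ _ _ _ hb.1 (by omega)]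
    exact (iterF_add e c j).symm
  intro n
  induction n using Nat.strong_induction_on with
  | _ n ih =>
    intro k hk a b
    rw [sqLoop]
    by_cases hpos : 0 < k
    · rw [dif_pos hpos]
      have hshift : k >>> (1:Nat) = k / 2 := by simp [Int.shiftRight_eq_div_pow]
      have hsd : (k / 2).toNat = k.toNat / 2 := by omega
      have hband : (PySem.Int.band k 1 ≠ 0) ↔ k % 2 = 1 := by
        rw [PySem.Int.band_one, PySem.Int.mod_eq_emod_of_pos (by norm_num)]
        omega
      rw [hshift]
      by_cases hodd : PySem.Int.band k 1 ≠ 0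
      · rw [if_pos hodd, hcomp a b, hcomp b b]
        rw [ih (k.toNat / 2) (by omega) (k / 2) hsd (b + a) (b + b)]
        have he : b + a + (k / 2).toNat * (b + b) = a + k.toNat * b := by
          rw [hsd]
          have ht : k.toNat = 2 * (k.toNat / 2) + 1 := by
            rw [hband] at hodd
            omega
          conv_rhs => rw [ht]
          ring
        rw [he]
      · rw [if_neg hodd, hcomp b b]
        rw [ih (k.toNat / 2) (by omega) (k / 2) hsd a (b + b)]
        have he : a + (k / 2).toNat * (b + b) = a + k.toNat * b := by
          rw [hsd]
          have ht : k.toNat = 2 * (k.toNat / 2) := by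
            rw [hband] at hodd
            omega
          conv_rhs => rw [ht]
          ring
        rw [he]
    · rw [dif_neg hpos]
      have h0 : k.toNat = 0 := by omega
      rw [h0]
      norm_num

-- B as a whole is the tail of the K-th iterate array
theorem solve_alt_eq (N : Int) (K : Int) :
    solve_alt N K = ((PySem.List.pyRange 0 (N + 1) 1).map (fun j => iterF K.toNat j)).tail := by
  unfold solve_alt
  have hid : PySem.List.pyRange 0 (N + 1) 1
      = (PySem.List.pyRange 0 (N + 1) 1).map (fun j => iterF 0 j) := by
    rw [show (fun j : Int => iterF 0 j) = fun j : Int => j from rfl, List.map_id']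
  have hone : (PySem.List.pyRange 0 (N + 1) 1).map (fun i => i - sum_digits i)
      = (PySem.List.pyRange 0 (N + 1) 1).map (fun j => iterF 1 j) := rfl
  have key := sqLoop_eq N K.toNat K rfl 0 1
  rw [← hid, ← hone] at key
  rw [key, PySem.List.slice_from_one]
  have he : 0 + K.toNat * 1 = K.toNat := by ring
  rw [he]

theorem getD_set {α : Type} (l : List α) (m j : Nat) (v d : α) :
    (l.set m v).getD j d = if m = j ∧ j < l.length then v else l.getD j d := by
  simp [List.getD_eq_getElem?_getD, List.getElem?_set]
  split_ifs <;> simp_all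

-- generic fill loop, identity index: arr[i] = v(i) for i in range(a, b)
theorem fold_fill_getD (v : Int → Int) :
    ∀ (n : Nat) (a b : Int) (init : List Int), 0 ≤ a → (b - a).toNat ≤ n →
      (((PySem.List.pyRange a b 1).foldl (fun arr i => PySem.List.pySetD arr i (v i)) init).length
          = init.length)
      ∧ ∀ (j : Nat), j < init.length →
          ((PySem.List.pyRange a b 1).foldl (fun arr i => PySem.List.pySetD arr i (v i)) init).getD j 0
            = if a ≤ (j : Int) ∧ (j : Int) < b then v j else init.getD j 0 := by
  intro n
  induction n with
  | zero =>
    intro a b init ha hn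
    rw [PySem.List.pyRange_one_eq_nil (by omega : b ≤ a)]
    refine ⟨rfl, fun j hj => ?_⟩
    rw [if_neg (by omega)]
    rfl
  | succ n ih =>
    intro a b init ha hn
    by_cases hab : b ≤ a
    · rw [PySem.List.pyRange_one_eq_nil hab]
      refine ⟨rfl, fun j hj => ?_⟩
      rw [if_neg (by omega)]
      rfl
    · have hb1 : b = (b - 1) + 1 := by omega
      rw [hb1, PySem.List.pyRange_one_succ_right (by omega : a ≤ b - 1), List.foldl_append]
      simp only [List.foldl_cons, List.foldl_nil]
      have H := ih a (b - 1) init ha (by omega)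
      rw [PySem.List.pySetD_of_nonneg _ _ (by omega : (0:Int) ≤ b - 1)]
      constructor
      · rw [List.length_set, H.1]
      · intro j hj
        rw [getD_set, H.1]
        by_cases hjb : (b - 1).toNat = j
        · rw [if_pos ⟨hjb, hj⟩, if_pos (by omega)]
          congr 1
          omega
        · rw [if_neg (by tauto), H.2 j hj]
          by_cases hcond : a ≤ (j : Int) ∧ (j : Int) < b - 1
          · rw [if_pos hcond, if_pos (by omega)]
          · rw [if_neg hcond, if_neg (by omega)]

-- generic fill loop, shifted index: arr[i-1] = v(i) for i in range(a, b)  (1 ≤ a)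
theorem fold_fill_sub1_getD (v : Int → Int) :
    ∀ (n : Nat) (a b : Int) (init : List Int), 1 ≤ a → (b - a).toNat ≤ n →
      (((PySem.List.pyRange a b 1).foldl (fun arr i => PySem.List.pySetD arr (i - 1) (v i)) init).length
          = init.length)
      ∧ ∀ (j : Nat), j < init.length →
          ((PySem.List.pyRange a b 1).foldl (fun arr i => PySem.List.pySetD arr (i - 1) (v i)) init).getD j 0
            = if a - 1 ≤ (j : Int) ∧ (j : Int) < b - 1 then v ((j : Int) + 1) else init.getD j 0 := by
  intro n
  induction n with
  | zero =>
    intro a b init ha hn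
    rw [PySem.List.pyRange_one_eq_nil (by omega : b ≤ a)]
    refine ⟨rfl, fun j hj => ?_⟩
    rw [if_neg (by omega)]
    rfl
  | succ n ih =>
    intro a b init ha hn
    by_cases hab : b ≤ a
    · rw [PySem.List.pyRange_one_eq_nil hab]
      refine ⟨rfl, fun j hj => ?_⟩
      rw [if_neg (by omega)]
      rfl
    · have hb1 : b = (b - 1) + 1 := by omega
      rw [hb1, PySem.List.pyRange_one_succ_right (by omega : a ≤ b - 1), List.foldl_append]
      simp only [List.foldl_cons, List.foldl_nil]
      have H := ih a (b - 1) init ha (by omega)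
      rw [PySem.List.pySetD_of_nonneg _ _ (by omega : (0:Int) ≤ b - 1 - 1)]
      constructor
      · rw [List.length_set, H.1]
      · intro j hj
        rw [getD_set, H.1]
        by_cases hjb : (b - 1 - 1).toNat = j
        · rw [if_pos ⟨hjb, hj⟩, if_pos (by omega)]
          congr 1
          omega
        · rw [if_neg (by tauto), H.2 j hj]
          by_cases hcond : a - 1 ≤ (j : Int) ∧ (j : Int) < b - 1 - 1
          · rw [if_pos hcond, if_pos (by omega)]
          · rw [if_neg hcond, if_neg (by omega)]

theorem nextArr_spec (N : Int) (hN : 0 ≤ N) :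
    (nextArr N).length = N.toNat + 1 ∧
      ∀ j : Nat, j ≤ N.toNat → (nextArr N).getD j 0 = iterF 1 (j : Int) := by
  have hlen : (List.replicate (N + 1).toNat (0:Int)).length = N.toNat + 1 := by
    rw [List.length_replicate]; omega
  have H := fold_fill_getD (fun i => i - sum_digits i) N.toNat 1 (N + 1)
    (List.replicate (N + 1).toNat 0) (by omega) (by omega)
  constructor
  · show _ = N.toNat + 1
    exact (H.1).trans hlen
  · intro j hj
    have hj' : j < (List.replicate (N + 1).toNat (0:Int)).length := by omega
    have h2 := H.2 j hj'
    by_cases h1 : 1 ≤ (j : Int)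
    · rw [if_pos ⟨h1, by omega⟩] at h2
      exact h2
    · have hj0 : j = 0 := by omega
      rw [if_neg (by omega)] at h2
      subst hj0
      have hv : (nextArr N).getD 0 0 = (0:Int) := by
        unfold nextArr
        exact h2.trans (List.getD_replicate _ (by omega))
      rw [hv]
      show (0:Int) = iterF 0 (pf 0)
      rw [pf_zero]
      rfl

def GoodJump (N : Int) (jump : List (List Int)) (p : Nat) : Prop :=
  jump.length = 32 ∧
  (∀ q : Nat, q < p →
      (jump.getD q []).length = N.toNat + 1 ∧
      ∀ j : Nat, j ≤ N.toNat → (jump.getD q []).getD j 0 = iterF (2 ^ q) (j : Int)) ∧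
  (∀ q : Nat, p ≤ q → q < 32 → jump.getD q [] = List.replicate (N.toNat + 1) 0)

theorem jump_step (N : Int) (hN : 0 ≤ N) (p : Int) (jump : List (List Int))
    (hp1 : 1 ≤ p) (hp32 : p.toNat < 32) (hG : GoodJump N jump p.toNat) :
    GoodJump N
      (PySem.List.pySetD jump p
        ((PySem.List.pyRange 1 (N + 1) 1).foldl
          (fun cur i =>
            PySem.List.pySetD cur i
              (PySem.List.pyGetD (PySem.List.pyGetD jump (p - 1) [])
                (PySem.List.pyGetD (PySem.List.pyGetD jump (p - 1) []) i 0) 0))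
          (PySem.List.pyGetD jump p [])))
      (p.toNat + 1) := by
  obtain ⟨hlen, hgood, hzero⟩ := hG
  have hprev : PySem.List.pyGetD jump (p - 1) [] = jump.getD (p - 1).toNat [] :=
    PySem.List.pyGetD_of_nonneg _ _ (by omega)
  have hq1 : (p - 1).toNat < p.toNat := by omega
  obtain ⟨hplen, hpval⟩ := hgood (p - 1).toNat hq1
  have hcurinit : PySem.List.pyGetD jump p [] = List.replicate (N.toNat + 1) 0 := by
    rw [PySem.List.pyGetD_of_nonneg _ _ (by omega : (0:Int) ≤ p)]
    exact hzero p.toNat le_rfl hp32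
  set prev := PySem.List.pyGetD jump (p - 1) [] with hprevdef
  rw [← hprev] at hpval hplen
  have He : 2 ^ p.toNat = 2 ^ ((p-1).toNat) + 2 ^ ((p-1).toNat) := by
    have : p.toNat = (p - 1).toNat + 1 := by omega
    rw [this, pow_succ]
    ring
  -- the inner fill computes iterF (2^p) at every index
  have H := fold_fill_getD
    (fun i => PySem.List.pyGetD prev (PySem.List.pyGetD prev i 0) 0)
    N.toNat 1 (N + 1) (PySem.List.pyGetD jump p []) (by omega) (by omega)
  have hinitlen : (PySem.List.pyGetD jump p []).length = N.toNat + 1 := by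
    rw [hcurinit, List.length_replicate]
  set cur := (PySem.List.pyRange 1 (N + 1) 1).foldl
    (fun cur i =>
      PySem.List.pySetD cur i
        (PySem.List.pyGetD prev (PySem.List.pyGetD prev i 0) 0))
    (PySem.List.pyGetD jump p []) with hcurdef
  have hcurlen : cur.length = N.toNat + 1 := by rw [hcurdef]; exact H.1.trans hinitlen
  have hcurval : ∀ j : Nat, j ≤ N.toNat → cur.getD j 0 = iterF (2 ^ p.toNat) (j : Int) := by
    intro j hj
    have h2 := H.2 j (by omega)
    by_cases h1 : 1 ≤ (j : Int)
    · rw [if_pos ⟨h1, by omega⟩] at h2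
      rw [h2]
      show PySem.List.pyGetD prev (PySem.List.pyGetD prev ((j : Int)) 0) 0
            = iterF (2 ^ p.toNat) ((j : Int))
      have hy1 : PySem.List.pyGetD prev (j : Int) 0 = iterF (2 ^ ((p-1).toNat)) (j : Int) := by
        rw [PySem.List.pyGetD_of_nonneg _ _ (by omega : (0:Int) ≤ (j:Int))]
        have hc : ((j : Int)).toNat = j := by omega
        rw [hc]
        exact hpval j hj
      have hyb := iterF_bounds (2 ^ ((p-1).toNat)) ((j : Int)) N (by omega) (by omega)
      rw [hy1, PySem.List.pyGetD_of_nonneg _ _ hyb.1]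
      have hyt : (iterF (2 ^ ((p-1).toNat)) ((j : Int))).toNat ≤ N.toNat := by omega
      rw [hpval _ hyt]
      have hyc : (((iterF (2 ^ ((p-1).toNat)) ((j : Int))).toNat : Nat) : Int)
          = iterF (2 ^ ((p-1).toNat)) ((j : Int)) := by omega
      rw [hyc, He, iterF_add]
    · have hj0 : j = 0 := by omega
      rw [if_neg (by omega)] at h2
      subst hj0
      rw [h2, hcurinit, List.getD_replicate _ (by omega)]
      norm_num [iterF_zero_fix]
  -- now the outer set
  rw [PySem.List.pySetD_of_nonneg _ _ (by omega : (0:Int) ≤ p)]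
  refine ⟨by rw [List.length_set]; exact hlen, ?_, ?_⟩
  · intro q hq
    rw [getD_set]
    by_cases hqp : p.toNat = q
    · rw [if_pos ⟨hqp, by omega⟩]
      subst hqp
      exact ⟨hcurlen, hcurval⟩
    · rw [if_neg (by tauto)]
      exact hgood q (by omega)
  · intro q hq hq32
    rw [getD_set, if_neg (by omega)]
    exact hzero q (by omega) hq32

theorem jumpTable_spec (N : Int) (hN : 0 ≤ N) : GoodJump N (jumpTable N) 32 := by
  have hN1 : (N + 1).toNat = N.toNat + 1 := by omega
  have hna := nextArr_spec N hN
  have hinit : GoodJump N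
      (PySem.List.pySetD (List.replicate 32 (List.replicate (N + 1).toNat (0 : Int))) 0
        (nextArr N)) 1 := by
    rw [PySem.List.pySetD_of_nonneg _ _ (by omega : (0:Int) ≤ 0)]
    refine ⟨by rw [List.length_set, List.length_replicate], ?_, ?_⟩
    · intro q hq
      have hq0 : q = 0 := by omega
      subst hq0
      rw [getD_set, if_pos ⟨rfl, by rw [List.length_replicate]; omega⟩]
      refine ⟨hna.1, ?_⟩
      intro j hj
      rw [hna.2 j hj, pow_zero]
    · intro q hq hq32
      rw [getD_set, if_neg (by omega), List.getD_replicate _ (by omega), hN1]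
  have hfold : ∀ (m : Nat) (p : Int) (jp : List (List Int)), 1 ≤ p → p.toNat + m = 32 →
      GoodJump N jp p.toNat →
      GoodJump N
        ((PySem.List.pyRange p 32 1).foldl
          (fun jump p =>
            let prev := PySem.List.pyGetD jump (p - 1) []
            let cur := (PySem.List.pyRange 1 (N + 1) 1).foldl
              (fun cur i =>
                PySem.List.pySetD cur i
                  (PySem.List.pyGetD prev (PySem.List.pyGetD prev i 0) 0))
              (PySem.List.pyGetD jump p [])
            PySem.List.pySetD jump p cur) jp) 32 := by
    intro m
    induction m with
    | zero =>
      intro p jp hp hpm hG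
      rw [PySem.List.pyRange_one_eq_nil (by omega : (32:Int) ≤ p)]
      simp only [List.foldl_nil]
      have hp32 : p.toNat = 32 := by omega
      rw [hp32] at hG
      exact hG
    | succ m ih =>
      intro p jp hp hpm hG
      rw [PySem.List.pyRange_one_cons (by omega : p < 32)]
      simp only [List.foldl_cons]
      apply ih (p + 1) _ (by omega) (by omega)
      have hstep := jump_step N hN p jp hp (by omega) hG
      have hpt : (p + 1).toNat = p.toNat + 1 := by omega
      rw [hpt]
      exact hstep
  unfold jumpTable
  refine hfold 31 1 _ (by norm_num) (by norm_num) ?_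
  have h1 : ((1:Int)).toNat = 1 := rfl
  rw [h1]
  exact hinit

theorem queryLoop_eq (N : Int) (jump : List (List Int)) (hj : GoodJump N jump 32) :
    ∀ (n : Nat) (steps : Int), steps.toNat = n → ∀ (bit x : Int), 0 ≤ bit → bit.toNat ≤ 32 →
      steps.toNat < 2 ^ (32 - bit.toNat) → 0 ≤ x → x ≤ N →
      queryLoop jump x steps bit = iterF (steps.toNat * 2 ^ bit.toNat) x := by
  intro n
  induction n using Nat.strong_induction_on with
  | _ n ih =>
    intro steps hs bit x hbit hb32 hlt hx0 hxN
    rw [queryLoop]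
    by_cases hpos : 0 < steps
    · rw [dif_pos hpos]
      have hb32' : bit.toNat < 32 := by
        by_contra hcon
        have h32 : bit.toNat = 32 := by omega
        rw [h32] at hlt
        norm_num at hlt
        omega
      have hshift : steps >>> (1:Nat) = steps / 2 := by simp [Int.shiftRight_eq_div_pow]
      have hsd : (steps / 2).toNat = steps.toNat / 2 := by omega
      have hsdlt : steps.toNat / 2 < n := by omega
      have hpt : (bit + 1).toNat = bit.toNat + 1 := by omega
      have hltrec : (steps / 2).toNat < 2 ^ (32 - (bit + 1).toNat) := by
        rw [hsd, hpt]
        have hc : 32 - bit.toNat = (32 - bit.toNat - 1) + 1 := by omega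
        rw [hc, pow_succ] at hlt
        have hc2 : 32 - (bit.toNat + 1) = 32 - bit.toNat - 1 := by omega
        rw [hc2]
        omega
      obtain ⟨hjlen, hjgood, _⟩ := hj
      have hlookup : PySem.List.pyGetD (PySem.List.pyGetD jump bit []) x 0
          = iterF (2 ^ bit.toNat) x := by
        rw [PySem.List.pyGetD_of_nonneg _ _ hbit, PySem.List.pyGetD_of_nonneg _ _ hx0]
        rw [(hjgood bit.toNat hb32').2 x.toNat (by omega)]
        congr 1
        omega
      have hband : (PySem.Int.band steps 1 ≠ 0) ↔ steps % 2 = 1 := by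
        rw [PySem.Int.band_one, PySem.Int.mod_eq_emod_of_pos (by norm_num)]
        omega
      rw [hshift]
      by_cases hodd : PySem.Int.band steps 1 ≠ 0
      · rw [if_pos hodd, hlookup]
        have hxb := iterF_bounds (2 ^ bit.toNat) x N hx0 hxN
        rw [ih (steps.toNat / 2) hsdlt (steps / 2) hsd (bit + 1) _ (by omega) (by omega)
            hltrec hxb.1 hxb.2]
        rw [hsd, hpt, ← iterF_add]
        congr 1
        have ht : steps.toNat = 2 * (steps.toNat / 2) + 1 := by
          rw [hband] at hodd
          omega
        rw [pow_succ]
        conv_rhs => rw [ht]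
        ring
      · rw [if_neg hodd]
        rw [ih (steps.toNat / 2) hsdlt (steps / 2) hsd (bit + 1) _ (by omega) (by omega)
            hltrec hx0 hxN]
        rw [hsd, hpt]
        congr 1
        have ht : steps.toNat = 2 * (steps.toNat / 2) := by
          rw [hband] at hodd
          omega
        rw [pow_succ]
        conv_rhs => rw [ht]
        ring
    · rw [dif_neg hpos]
      have h0 : steps.toNat = 0 := by omega
      rw [h0]
      norm_num
      rfl

-- ===== VERDICT (by name: the statement is the Claim_ definition above) =====
theorem solve_spec : Claim_equal_solve := by
  unfold Claim_equal_solve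
  intro N K hdom
  unfold Spec_solve
  have hdom' : K ≤ 2147483648 := by
    unfold Dom_solve pvDomInt at hdom
    simp at hdom
    omega
  rw [solve_alt_eq]
  by_cases hN : N ≤ 0
  · have hrange : PySem.List.pyRange 1 (N + 1) 1 = [] :=
      PySem.List.pyRange_one_eq_nil (by omega)
    have hA : solve N K = [] := by
      show (PySem.List.pyRange 1 (N + 1) 1).foldl
          (fun res i => PySem.List.pySetD res (i - 1) (queryLoop (jumpTable N) i K 0))
          (List.replicate N.toNat 0)
        = []
      rw [hrange]
      simp only [List.foldl_nil]
      have h0 : N.toNat = 0 := by omega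
      rw [h0]
      rfl
    rw [hA]
    symm
    apply List.eq_nil_of_length_eq_zero
    rw [List.length_tail, List.length_map, PySem.List.length_pyRange_one]
    omega
  · have hN0 : (0:Int) ≤ N := by omega
    have GJ := jumpTable_spec N hN0
    have hKlt : K.toNat < 2 ^ (32 - ((0:Int)).toNat) := by
      norm_num
      omega
    have HA := fold_fill_sub1_getD (fun i => queryLoop (jumpTable N) i K 0) N.toNat 1 (N + 1)
      (List.replicate N.toNat 0) le_rfl (by omega)
    have hmap : ((PySem.List.pyRange 0 (N + 1) 1).map (fun j => iterF K.toNat j)).tail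
        = (PySem.List.pyRange 1 (N + 1) 1).map (fun j => iterF K.toNat j) := by
      rw [PySem.List.pyRange_one_cons (by omega : (0:Int) < N + 1)]
      rw [List.map_cons, List.tail_cons]
      norm_num
    rw [hmap]
    have hlenA : (solve N K).length = N.toNat :=
      HA.1.trans (by rw [List.length_replicate])
    apply List.ext_getElem
    · rw [hlenA, List.length_map, PySem.List.length_pyRange_one]
      omega
    · intro j h1 h2
      have hjN : j < N.toNat := by rwa [hlenA] at h1
      have hgetD : (solve N K).getD j 0 = queryLoop (jumpTable N) ((j:Int) + 1) K 0 := by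
        have h3 := HA.2 j (by rw [List.length_replicate]; exact hjN)
        rw [if_pos (by constructor <;> omega)] at h3
        exact h3
      rw [List.getElem_map, PySem.List.getElem_pyRange_one]
      calc (solve N K)[j]'h1
          = (solve N K).getD j 0 := (List.getD_eq_getElem _ _ h1).symm
        _ = queryLoop (jumpTable N) ((j:Int) + 1) K 0 := hgetD
        _ = iterF (K.toNat * 2 ^ ((0:Int)).toNat) ((j:Int) + 1) :=
            queryLoop_eq N _ GJ K.toNat K rfl 0 _ le_rfl (by norm_num) hKlt (by omega) (by omega)
        _ = iterF K.toNat ((j:Int) + 1) := by norm_num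
        _ = iterF K.toNat (1 + (j:Int)) := by rw [add_comm]
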